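-- pv_equiv track=rewrite | github.com/psxio/striper-robot | backend/postgres_runtime.py | _normalize_sql
-- ===== SOURCE A (Python) =====
-- from typing import Any, Iterable
--
-- def _normalize_sql(sql: str, params: Iterable[Any] | None) -> tuple[str, dict[str, Any]]:
--     if not params:
--         return sql, {}
--     if isinstance(params, dict):
--         return sql, params
--     values = list(params)
--     converted = []
--     bindings: dict[str, Any] = {}
--     index = 0
--     for char in sql:
--         if char == "?":
--             key = f"p{index}"
--             converted.append(f":{key}")
--             bindings[key] = values[index]
--             index += 1
--         else:
--             converted.append(char)
--     return "".join(converted), bindings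
-- ===== SOURCE B (Python) =====
-- def _normalize_sql(sql, params):
--     if not params:
--         return sql, {}
--     if isinstance(params, dict):
--         return sql, params
--     values = list(params)
--     parts = sql.split('?')
--     n = len(parts) - 1
--     converted = parts[0] + ''.join(f':p{i}' + parts[i + 1] for i in range(n))
--     bindings = {f'p{i}': values[i] for i in range(n)}
--     return converted, bindings
-- ===== Notes on version B (the rewrite author's own statement) =====
-- stated objective: idiomatic
-- what changed: B replaces A's character-by-character scan that appends to converted/bindings with a split on '?' followed by interleaving named placeholders between the segments, building the bindings dict by a comprehension over the segment count.
import Mathlib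
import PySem

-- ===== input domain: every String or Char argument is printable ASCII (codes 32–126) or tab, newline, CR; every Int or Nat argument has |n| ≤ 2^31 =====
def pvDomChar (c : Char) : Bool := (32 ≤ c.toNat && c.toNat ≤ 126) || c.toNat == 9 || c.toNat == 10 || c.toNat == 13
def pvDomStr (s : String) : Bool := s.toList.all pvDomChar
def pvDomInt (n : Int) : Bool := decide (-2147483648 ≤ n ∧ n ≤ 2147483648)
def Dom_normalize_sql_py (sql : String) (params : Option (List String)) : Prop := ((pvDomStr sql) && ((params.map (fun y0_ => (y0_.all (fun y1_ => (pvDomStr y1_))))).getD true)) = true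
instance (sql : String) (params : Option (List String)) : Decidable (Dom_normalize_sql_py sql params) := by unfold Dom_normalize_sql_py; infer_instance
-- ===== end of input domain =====

-- B rebuilds the query by splitting on '?' and interleaving named placeholders between the
-- segments, instead of A's character-by-character scan; objective: idiomatic.

-- ===== PORT A =====
-- key f"p{index}" as characters / as a string (Python str(index) = PySem.Int.toChars)
def pvKeyChars (i : Nat) : List Char := 'p' :: PySem.Int.toChars (i : Int)

def pvKey (i : Nat) : String := String.ofList (pvKeyChars i)

-- the 'for char in sql' loop of A: state = (index, converted, bindings)
def pvGoA (values : List String) : List Char → Nat → List Char → PySem.Dict String String → List Char × PySem.Dict String String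
  | [], _, conv, b => (conv, b)
  | c :: cs, i, conv, b =>
    if c = '?' then
      pvGoA values cs (i + 1) (conv ++ ':' :: pvKeyChars i)
        (b.insert (pvKey i) (PySem.List.pyGetD values (i : Int) ""))
    else
      pvGoA values cs i (conv ++ [c]) b

def normalize_sql_py (sql : String) (params : Option (List String)) : String × (List (String × String)) :=
  match params with
  | none => (sql, [])          -- 'if not params' (None)
  | some [] => (sql, [])       -- 'if not params' (empty list); the dict branch is untaken (params is a list)
  | some values =>
      let r := pvGoA values sql.toList 0 [] PySem.Dict.empty
      (String.ofList r.1, r.2.items)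

-- ===== PORT B =====
-- key f"p{i}" for port B
def pvKeyCharsB (i : Nat) : List Char := 'p' :: PySem.Int.toChars (i : Int)

def pvKeyB (i : Nat) : String := String.ofList (pvKeyCharsB i)

def normalize_sql_py_alt (sql : String) (params : Option (List String)) : String × (List (String × String)) :=
  match params with
  | none => (sql, [])
  | some values =>
      if values.isEmpty then (sql, [])
      else
        let parts := PySem.Chars.splitOn sql.toList ['?']
        let n := parts.length - 1
        let converted := parts.headI ++
          PySem.Chars.join [] ((List.range n).map (fun i => ':' :: pvKeyCharsB i ++ parts.getD (i + 1) []))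
        let bindings := (List.range n).map (fun i => (pvKeyB i, PySem.List.pyGetD values (i : Int) ""))
        (String.ofList converted, bindings)

-- ===== PRECONDITION & SPEC =====
-- Pre_ excludes exactly the inputs where Python A raises IndexError: a non-empty params list
-- with fewer elements than there are '?' in sql (B raises the same IndexError there).
def Pre_normalize_sql_py (sql : String) (params : Option (List String)) : Prop :=
  params.getD [] = [] ∨ sql.toList.count '?' ≤ (params.getD []).length
instance (sql : String) (params : Option (List String)) : Decidable (Pre_normalize_sql_py sql params) := by unfold Pre_normalize_sql_py; infer_instance

def pvWitness_normalize_sql_py : String × Option (List String) := ("a?b", some ["x"])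

def Spec_normalize_sql_py (sql : String) (params : Option (List String)) (out : String × (List (String × String))) : Prop := out = normalize_sql_py_alt sql params
instance (sql : String) (params : Option (List String)) (out : String × (List (String × String))) : Decidable (Spec_normalize_sql_py sql params out) := by unfold Spec_normalize_sql_py; infer_instance

-- ===== CLAIM (what is proved, stated in full; the proofs are below) =====
def Claim_equal_normalize_sql_py : Prop := ∀ (sql : String) (params : Option (List String)), Dom_normalize_sql_py sql params → Pre_normalize_sql_py sql params → Spec_normalize_sql_py sql params (normalize_sql_py sql params)

-- ===== LEMMAS AND PROOFS =====

@[simp] lemma pvKeyCharsB_eq (i : Nat) : pvKeyCharsB i = pvKeyChars i := rfl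

@[simp] lemma pvKeyB_eq (i : Nat) : pvKeyB i = pvKey i := rfl

def pvDig (n : Nat) : List Char :=
  if _h : n < 10 then [Nat.digitChar n]
  else pvDig (n / 10) ++ [Nat.digitChar (n % 10)]
  decreasing_by exact Nat.div_lt_self (by omega) (by omega)

lemma pvToDigitsCore_eq : ∀ (f n : Nat) (acc : List Char), n < f →
    Nat.toDigitsCore 10 f n acc = pvDig n ++ acc := by
  intro f
  induction f with
  | zero => intro n acc h; omega
  | succ f ih =>
      intro n acc h
      rw [Nat.toDigitsCore]
      by_cases h10 : n / 10 = 0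
      · have hlt : n < 10 := by omega
        simp only [h10, if_pos rfl]
        conv_rhs => rw [pvDig]
        simp [if_pos hlt, Nat.mod_eq_of_lt hlt]
      · simp only [if_neg h10]
        have hn10 : ¬ n < 10 := fun hc => h10 (Nat.div_eq_of_lt hc)
        conv_rhs => rw [pvDig]
        simp only [dif_neg hn10]
        rw [ih (n / 10) _ (by omega)]
        simp

lemma pvToDigits_eq (n : Nat) : Nat.toDigits 10 n = pvDig n := by
  have := pvToDigitsCore_eq (n + 1) n [] (by omega)
  simpa [Nat.toDigits] using this

def pvVal (cs : List Char) : Nat := cs.foldl (fun a c => 10 * a + (c.toNat - 48)) 0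

lemma pvVal_dig (n : Nat) : pvVal (pvDig n) = n := by
  induction n using Nat.strong_induction_on with
  | _ n ih =>
    rw [pvDig]
    by_cases hlt : n < 10
    · simp only [dif_pos hlt]
      unfold pvVal
      simp only [List.foldl_cons, List.foldl_nil]
      interval_cases n <;> decide
    · simp only [dif_neg hlt]
      unfold pvVal
      rw [List.foldl_append]
      have := ih (n / 10) (Nat.div_lt_self (by omega) (by omega))
      unfold pvVal at this
      rw [this]
      simp only [List.foldl_cons, List.foldl_nil]
      have hd : (Nat.digitChar (n % 10)).toNat - 48 = n % 10 := by
        have : n % 10 < 10 := Nat.mod_lt _ (by omega)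
        interval_cases h : n % 10 <;> decide
      rw [hd]
      omega

lemma pvDig_inj {m n : Nat} (h : pvDig m = pvDig n) : m = n := by
  have := pvVal_dig m; rw [h, pvVal_dig] at this; omega

lemma pvToChars_nat (i : Nat) : PySem.Int.toChars (i : Int) = Nat.toDigits 10 i := by
  simp [PySem.Int.toChars]

lemma pvKey_inj {i j : Nat} (h : pvKey i = pvKey j) : i = j := by
  apply pvDig_inj
  have h2 : pvKeyChars i = pvKeyChars j := by
    have := congrArg String.toList h
    simpa [pvKey] using this
  simp only [pvKeyChars, pvToChars_nat, pvToDigits_eq, List.cons.injEq] at h2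
  exact h2.2

-- canonical one-pass forms of the converted text and the bindings
def pvC : List Char → Nat → List Char
  | [], _ => []
  | c :: cs, i => if c = '?' then ':' :: pvKeyChars i ++ pvC cs (i + 1) else c :: pvC cs i

def pvBd (values : List String) : List Char → Nat → List (String × String)
  | [], _ => []
  | c :: cs, i =>
    if c = '?' then (pvKey i, PySem.List.pyGetD values (i : Int) "") :: pvBd values cs (i + 1)
    else pvBd values cs i

lemma pvGoA_eq (values : List String) : ∀ (cs : List Char) (i : Nat) (conv : List Char) (b : PySem.Dict String String),
    (∀ j, i ≤ j → b.contains (pvKey j) = false) →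
    pvGoA values cs i conv b = (conv ++ pvC cs i, PySem.Dict.mk (b.items ++ pvBd values cs i)) := by
  intro cs
  induction cs with
  | nil => intro i conv b hb; simp [pvGoA, pvC, pvBd]
  | cons c cs ih =>
    intro i conv b hb
    by_cases hc : c = '?'
    · subst hc
      rw [pvGoA, if_pos rfl]
      rw [ih (i + 1) _ _ ?_]
      · rw [PySem.Dict.items_insert_of_not_contains _ _ (hb i le_rfl)]
        rw [pvC, pvBd]
        simp
      · intro j hj
        rw [PySem.Dict.contains_insert]
        have h1 : (pvKey j == pvKey i) = false := by
          simp only [beq_eq_false_iff_ne, ne_eq]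
          intro he; have := pvKey_inj he; omega
        rw [h1, hb j (by omega)]
        rfl
    · rw [pvGoA, if_neg hc, ih i _ _ hb, pvC, pvBd]
      simp [hc]

-- single-character split, recursively
def pvSplit : List Char → List (List Char)
  | [] => [[]]
  | c :: cs => if c = '?' then [] :: pvSplit cs else (c :: (pvSplit cs).headI) :: (pvSplit cs).tail

lemma pvSplit_cons (cs : List Char) : pvSplit cs = (pvSplit cs).headI :: (pvSplit cs).tail := by
  cases cs with
  | nil => rfl
  | cons c cs =>
    rw [pvSplit]
    by_cases h : c = '?' <;> simp [h]

lemma pvSplitOn_go_eq : ∀ (f : Nat) (cs cur : List Char) (acc : List (List Char)), cs.length < f →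
    PySem.Chars.splitOn.go ['?'] f cs cur acc
      = acc.reverse ++ (cur.reverse ++ (pvSplit cs).headI) :: (pvSplit cs).tail := by
  intro f
  induction f with
  | zero => intro cs cur acc h; omega
  | succ f ih =>
    intro cs cur acc h
    cases cs with
    | nil =>
      rw [PySem.Chars.splitOn.go]
      · simp [pvSplit]
      · omega
    | cons c rest =>
      rw [PySem.Chars.splitOn.go]
      by_cases hc : c = '?'
      · subst hc
        simp only [List.isPrefixOf, BEq.rfl, Bool.true_and, List.isPrefixOf_nil_left, if_pos]
        simp only [List.length_cons, List.length_nil, List.drop_succ_cons, List.length_nil, List.drop_zero]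
        rw [ih rest [] ((List.reverse cur) :: acc) (by simp at h ⊢; omega)]
        have hs : pvSplit ('?' :: rest) = [] :: pvSplit rest := by rw [pvSplit]; simp
        rw [hs]
        simp [← pvSplit_cons rest]
      · have : (['?'].isPrefixOf (c :: rest)) = false := by
          simp [List.isPrefixOf]
          exact fun hh => hc hh.symm
        rw [if_neg (by simp [this])]
        rw [ih rest (c :: cur) acc (by simp at h ⊢; omega)]
        have hs : pvSplit (c :: rest) = (c :: (pvSplit rest).headI) :: (pvSplit rest).tail := by
          rw [pvSplit]; simp [hc]
        rw [hs]
        simp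

lemma pvSplitOn_eq (cs : List Char) : PySem.Chars.splitOn cs ['?'] = pvSplit cs := by
  rw [PySem.Chars.splitOn, pvSplitOn_go_eq (cs.length + 1) cs [] [] (by omega)]
  simp [← pvSplit_cons]

lemma pvC_parts : ∀ (cs : List Char) (i : Nat),
    pvC cs i = (pvSplit cs).headI ++
      ((List.range ((pvSplit cs).length - 1)).map
        (fun k => ':' :: pvKeyChars (i + k) ++ (pvSplit cs).getD (k + 1) [])).flatten := by
  intro cs
  induction cs with
  | nil => intro i; simp [pvC, pvSplit]
  | cons c cs ih =>
    intro i
    rcases hsplit : pvSplit cs with _ | ⟨hd, tl⟩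
    · exact absurd (pvSplit_cons cs) (by rw [hsplit]; simp)
    by_cases hc : c = '?'
    · subst hc
      have hs : pvSplit ('?' :: cs) = [] :: hd :: tl := by rw [pvSplit]; simp [hsplit]
      rw [pvC, if_pos rfl, hs]
      simp only [List.headI_cons, List.nil_append, List.length_cons, Nat.add_sub_cancel]
      rw [List.range_succ_eq_map, List.map_cons, List.flatten_cons, List.map_map]
      have hmap : ∀ k ∈ List.range tl.length,
          ((fun k => ':' :: pvKeyChars (i + k) ++ ([] :: hd :: tl).getD (k + 1) []) ∘ Nat.succ) k
            = (fun k => ':' :: pvKeyChars ((i + 1) + k) ++ ((hd :: tl).getD (k + 1) [])) k := by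
        intro k _
        have h1 : i + (k + 1) = i + 1 + k := by omega
        simp only [Function.comp, Nat.succ_eq_add_one, List.getD_cons_succ, h1]
      rw [List.map_congr_left hmap]
      rw [ih (i + 1)]
      rw [hsplit]
      simp [List.getD_cons_succ]
    · have hs : pvSplit (c :: cs) = (c :: hd) :: tl := by rw [pvSplit]; simp [hc, hsplit]
      rw [pvC, if_neg hc, hs, ih i, hsplit]
      simp only [List.headI_cons, List.length_cons, Nat.add_sub_cancel]
      have hmap : ∀ k ∈ List.range tl.length,
          (fun k => ':' :: pvKeyChars (i + k) ++ ((c :: hd) :: tl).getD (k + 1) []) k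
            = (fun k => ':' :: pvKeyChars (i + k) ++ ((hd :: tl).getD (k + 1) [])) k := by
        intro k _; simp [List.getD_cons_succ]
      rw [List.map_congr_left hmap]
      simp

lemma pvBd_parts (values : List String) : ∀ (cs : List Char) (i : Nat),
    pvBd values cs i = (List.range ((pvSplit cs).length - 1)).map
      (fun k => (pvKey (i + k), PySem.List.pyGetD values ((i + k : Nat) : Int) "")) := by
  intro cs
  induction cs with
  | nil => intro i; simp [pvBd, pvSplit]
  | cons c cs ih =>
    intro i
    by_cases hc : c = '?'
    · subst hc
      have hs : pvSplit ('?' :: cs) = [] :: pvSplit cs := by rw [pvSplit]; simp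
      have hlen : (pvSplit cs).length = ((pvSplit cs).length - 1) + 1 := by
        rw [pvSplit_cons cs]; simp
      rw [pvBd, if_pos rfl, hs]
      simp only [List.length_cons, Nat.add_sub_cancel]
      rw [hlen, List.range_succ_eq_map, List.map_cons, List.map_map]
      rw [ih (i + 1)]
      refine congrArg₂ List.cons (by simp) ?_
      apply List.map_congr_left
      intro k _
      have h1 : i + 1 + k = i + (k + 1) := by omega
      simp only [Function.comp, Nat.succ_eq_add_one, h1]
    · have hs : pvSplit (c :: cs) = (c :: (pvSplit cs).headI) :: (pvSplit cs).tail := by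
        rw [pvSplit]; simp [hc]
      rw [pvBd, if_neg hc, hs, ih i]
      have hlen : ((c :: (pvSplit cs).headI) :: (pvSplit cs).tail).length - 1
          = (pvSplit cs).length - 1 := by
        conv_rhs => rw [pvSplit_cons cs]
        simp
      rw [hlen]

lemma pvJoin_nil (ps : List (List Char)) : PySem.Chars.join [] ps = ps.flatten := by
  unfold PySem.Chars.join List.intercalate
  induction ps with
  | nil => rfl
  | cons p ps ih =>
    cases ps with
    | nil => rfl
    | cons q ps =>
      have h : List.intersperse ([] : List Char) (p :: q :: ps)
          = p :: [] :: List.intersperse [] (q :: ps) := rfl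
      rw [h, List.flatten_cons, List.flatten_cons, ih, List.flatten_cons]
      simp

-- ===== VERDICT (by name: the statement is the Claim_ definition above) =====
theorem normalize_sql_py_spec : Claim_equal_normalize_sql_py := by
  intro sql params _hdom _hpre
  unfold Spec_normalize_sql_py
  match params with
  | none => rfl
  | some [] => rfl
  | some (v :: vs) =>
    show normalize_sql_py sql (some (v :: vs)) = normalize_sql_py_alt sql (some (v :: vs))
    unfold normalize_sql_py normalize_sql_py_alt
    simp only
    rw [pvGoA_eq (v :: vs) sql.toList 0 [] PySem.Dict.empty (fun j _ => PySem.Dict.contains_empty _)]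
    rw [pvSplitOn_eq, pvJoin_nil]
    rw [pvC_parts sql.toList 0, pvBd_parts (v :: vs) sql.toList 0]
    simp [PySem.Dict.empty]
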